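-- pv_equiv track=rewrite | github.com/diabloget/2048proyecto | Progra.py | TryWin
-- ===== SOURCE A (Python) =====
-- def TryWin(m,a,b):
--     if(a==4):
--         return False
--     if(m[a][b]==2048):
--         return True
--     else:
--         if(b!=3):
--             return TryWin(m,a,b+1)
--         else:
--             return TryWin(m,a+1,0)
-- ===== SOURCE B (Python) =====
-- def TryWin(m, a, b):
--     if a == 4:
--         return False
--     row = m[a]
--     return (any(row[c] == 2048 for c in range(b, 4))
--             or any(m[r][c] == 2048 for r in range(a + 1, 4) for c in range(4)))
-- ===== Notes on version B (the rewrite author's own statement) =====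
-- stated objective: simpler
-- what changed: Replaces the cell-by-cell tail recursion with a row fetch plus any() over the scanned coordinates (rest of row a, then all cells of rows a+1..3).
-- outside the precondition, e.g. on TryWin([[2048]], 0, 0): A returns True, B returns True
import Mathlib
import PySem

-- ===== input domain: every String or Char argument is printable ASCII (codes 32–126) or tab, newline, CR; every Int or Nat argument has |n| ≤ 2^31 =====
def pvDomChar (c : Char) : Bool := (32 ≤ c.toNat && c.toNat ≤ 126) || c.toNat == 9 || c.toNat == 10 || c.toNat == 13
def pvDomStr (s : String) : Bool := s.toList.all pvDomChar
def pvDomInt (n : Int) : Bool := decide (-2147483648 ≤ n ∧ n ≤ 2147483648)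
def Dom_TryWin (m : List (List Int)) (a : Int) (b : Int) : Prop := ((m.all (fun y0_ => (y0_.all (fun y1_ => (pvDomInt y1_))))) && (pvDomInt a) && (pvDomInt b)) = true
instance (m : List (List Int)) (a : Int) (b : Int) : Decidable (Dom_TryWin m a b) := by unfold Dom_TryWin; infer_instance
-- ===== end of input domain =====

-- B replaces A's cell-by-cell tail recursion with a row fetch plus `any` over the scanned coordinates (simpler decomposition, same cost).

-- ===== PORT A =====
-- A's recursion has no structural measure (its halting depends on the IndexError
-- Python would raise), so the port carries a fuel counter computed from the
-- input; it exceeds the number of recursive calls any input admitted by Pre_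
-- performs (at most 8·len(m) + (3-b) + 40).
def TryWinGo (fuel : Nat) (m : List (List Int)) (a : Int) (b : Int) : Bool :=
  match fuel with
  | 0 => false
  | Nat.succ fuel =>
    if a = 4 then false
    else
      match PySem.List.pyGet? m a with
      | none => false  -- Python raises IndexError here (excluded by Pre_)
      | some row =>
        match PySem.List.pyGet? row b with
        | none => false  -- Python raises IndexError here (excluded by Pre_)
        | some v =>
          if v = 2048 then true
          else if b ≠ 3 then TryWinGo fuel m a (b + 1)
          else TryWinGo fuel m (a + 1) 0

def TryWin (m : List (List Int)) (a : Int) (b : Int) : Bool :=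
  TryWinGo (8 * m.length + (3 - b).toNat + 64) m a b

-- ===== PORT B =====
def TryWin_alt (m : List (List Int)) (a : Int) (b : Int) : Bool :=
  if a = 4 then false
  else
    match PySem.List.pyGet? m a with
    | none => false  -- Source B raises IndexError here (outside Pre_)
    | some row =>
      ((PySem.List.pyRange b 4 1).any (fun c =>
          decide (PySem.List.pyGet? row c = some 2048)))
      || ((PySem.List.pyRange (a + 1) 4 1).any (fun r =>
            (PySem.List.pyRange 0 4 1).any (fun c =>
              decide (((PySem.List.pyGet? m r).bind (fun rw => PySem.List.pyGet? rw c)) = some 2048))))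

-- ===== PRECONDITION & SPEC =====
-- Pre_ admits exactly the inputs on which every cell access of A's scan is a
-- valid Python index (so A raises no IndexError): either the terminal row
-- a = 4 (no cell is read), or a board whose rows a…3 exist and reach column 3,
-- with a start column b the first row can index.  Inputs where A happens to
-- return only because it finds 2048 before its first invalid access are
-- excluded: A's return there depends on cell values, not on the board's shape.
def Pre_TryWin (m : List (List Int)) (a : Int) (b : Int) : Prop :=
  a = 4 ∨
  (4 ≤ m.length ∧ -(m.length : Int) ≤ a ∧ a < 4 ∧ b ≤ 3 ∧
   (∀ r ∈ PySem.List.pyRange a 4 1,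
      (PySem.List.pyGet? m r).all (fun row => decide (4 ≤ row.length)) = true) ∧
   (PySem.List.pyGet? m a).all (fun row => decide (-(row.length : Int) ≤ b)) = true)
instance (m : List (List Int)) (a : Int) (b : Int) : Decidable (Pre_TryWin m a b) := by
  unfold Pre_TryWin; infer_instance

def pvWitness_TryWin : List (List Int) × Int × Int :=
  ([[2, 4, 8, 16], [32, 64, 128, 256], [512, 1024, 2048, 4], [2, 2, 4, 4]], 0, 0)

def Spec_TryWin (m : List (List Int)) (a : Int) (b : Int) (out : Bool) : Prop := out = TryWin_alt m a b
instance (m : List (List Int)) (a : Int) (b : Int) (out : Bool) : Decidable (Spec_TryWin m a b out) := by unfold Spec_TryWin; infer_instance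

-- ===== CLAIM (what is proved, stated in full; the proofs are below) =====
def Claim_equal_TryWin : Prop := ∀ (m : List (List Int)) (a : Int) (b : Int), Dom_TryWin m a b → Pre_TryWin m a b → Spec_TryWin m a b (TryWin m a b)

-- ===== LEMMAS AND PROOFS =====

-- an upper bound on the number of recursive calls A still makes from state (a, b)
def pvRem (a b : Int) : Nat := (4 - a).toNat * 8 + (3 - b).toNat

theorem pvAnyCongr {α : Type} (l : List α) (p q : α → Bool)
    (h : ∀ x ∈ l, p x = q x) : l.any p = l.any q := by
  induction l with
  | nil => rfl
  | cons x xs ih => simp [List.any_cons, h x (by simp), ih (fun y hy => h y (by simp [hy]))]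

theorem pvGetSome (xs : List Int) (i : Int) (h1 : -xs.length ≤ i) (h2 : i < xs.length) :
    ∃ v, PySem.List.pyGet? xs i = some v := by
  cases hg : PySem.List.pyGet? xs i with
  | some v => exact ⟨v, rfl⟩
  | none =>
    rw [PySem.List.pyGet?_eq_none_iff] at hg
    exact absurd ⟨h1, h2⟩ hg

theorem pvGetRowSome (m : List (List Int)) (i : Int) (hm : 4 ≤ m.length)
    (h1 : -(m.length : Int) ≤ i) (h2 : i < 4) :
    ∃ row, PySem.List.pyGet? m i = some row := by
  cases hg : PySem.List.pyGet? m i with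
  | some row => exact ⟨row, rfl⟩
  | none =>
    rw [PySem.List.pyGet?_eq_none_iff] at hg
    exact absurd ⟨h1, by omega⟩ hg

theorem pvGoEq (n : Nat) (m : List (List Int)) (a b : Int)
    (hm : 4 ≤ m.length)
    (ha1 : -(m.length : Int) ≤ a) (ha2 : a ≤ 4) (hb2 : b ≤ 3)
    (hrows : ∀ r : Int, a ≤ r → r < 4 → ∀ row, PySem.List.pyGet? m r = some row → 4 ≤ row.length)
    (hb1 : ∀ row, PySem.List.pyGet? m a = some row → -(row.length : Int) ≤ b)
    (hn : pvRem a b ≤ n) :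
    TryWinGo n m a b = TryWin_alt m a b := by
  induction n generalizing a b with
  | zero =>
    have ha : a = 4 := by unfold pvRem at hn; omega
    subst ha
    simp [TryWinGo, TryWin_alt]
  | succ n ih =>
    by_cases h4 : a = 4
    · subst h4
      simp [TryWinGo, TryWin_alt]
    · have ha : a < 4 := lt_of_le_of_ne ha2 h4
      obtain ⟨row, hrow⟩ := pvGetRowSome m a hm ha1 ha
      have hrl : 4 ≤ row.length := hrows a le_rfl ha row hrow
      obtain ⟨v, hv⟩ := pvGetSome row b (hb1 row hrow) (by omega)
      rw [show TryWinGo (n + 1) m a b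
            = (if a = 4 then false
               else match PySem.List.pyGet? m a with
                 | none => false
                 | some row =>
                   match PySem.List.pyGet? row b with
                   | none => false
                   | some v =>
                     if v = 2048 then true
                     else if b ≠ 3 then TryWinGo n m a (b + 1)
                     else TryWinGo n m (a + 1) 0) from rfl,
          if_neg h4]
      simp only [hrow, hv]
      by_cases hwin : v = 2048
      · rw [if_pos hwin]
        subst hwin
        unfold TryWin_alt
        rw [if_neg h4]
        simp only [hrow]
        symm
        rw [Bool.or_eq_true]
        left
        rw [List.any_eq_true]
        refine ⟨b, ?_, by simp [hv]⟩
        rw [PySem.List.mem_pyRange_one]; omega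
      · rw [if_neg hwin]
        by_cases hb3 : b = 3
        · subst hb3
          rw [if_neg (by simp)]
          rw [ih (a + 1) 0 (by omega) (by omega) (by omega)
                (fun r h1 h2 => hrows r (by omega) h2)
                (fun row' _ => by omega)
                (by unfold pvRem at hn ⊢; omega)]
          unfold TryWin_alt
          rw [if_neg h4]
          simp only [hrow]
          rw [show PySem.List.pyRange 3 4 1 = [3] by
                have h := PySem.List.pyRange_one_singleton 3
                norm_num at h
                exact h]
          simp only [List.any_cons, List.any_nil, Bool.or_false, hv]
          rw [show (decide (some v = some 2048)) = false by simp [hwin], Bool.false_or]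
          by_cases h5 : a + 1 = 4
          · rw [if_pos h5, h5, PySem.List.pyRange_one_eq_nil (le_refl (4 : Int))]
            rfl
          · have ha' : a + 1 < 4 := by omega
            obtain ⟨row', hrow'⟩ := pvGetRowSome m (a + 1) hm (by omega) ha'
            rw [if_neg h5]
            simp only [hrow']
            rw [PySem.List.pyRange_one_cons ha']
            simp only [List.any_cons]
            congr 1
            apply pvAnyCongr
            intro c hc
            simp [hrow']
        · rw [if_pos hb3]
          rw [ih a (b + 1) ha1 ha2 (by omega) hrows
                (fun row' h => by have := hb1 row' h; omega)
                (by unfold pvRem at hn ⊢; omega)]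
          unfold TryWin_alt
          rw [if_neg h4, if_neg h4]
          simp only [hrow]
          rw [PySem.List.pyRange_one_cons (show b < 4 by omega)]
          simp only [List.any_cons, hv]
          rw [show (decide (some v = some 2048)) = false by simp [hwin], Bool.false_or]

-- ===== VERDICT (by name: the statement is the Claim_ definition above) =====
theorem TryWin_spec : Claim_equal_TryWin := by
  intro m a b _ hpre
  unfold Spec_TryWin TryWin
  rcases hpre with h4 | ⟨hm, ha1, ha2, hb2, hall, hcol⟩
  · subst h4
    simp [TryWinGo, TryWin_alt]
  · refine pvGoEq _ m a b (by exact_mod_cast hm) ha1 (by omega) hb2 ?_ ?_ ?_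
    · intro r h1 h2 row hget
      have hmem : r ∈ PySem.List.pyRange a 4 1 := PySem.List.mem_pyRange_one.mpr ⟨h1, h2⟩
      have := hall r hmem
      rw [hget] at this
      simpa using this
    · intro row hget
      rw [hget] at hcol
      simpa using hcol
    · unfold pvRem
      omega
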